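-- pv_equiv track=rewrite | github.com/littlealan-dev/ai-singer-diffsinger | src/backend/orchestrator.py | _collapse_measures_to_spans
-- ===== SOURCE A (Python) =====
-- from typing import Any, Awaitable, Callable, Dict, List, Literal, Optional, Tuple
--
-- def _collapse_measures_to_spans(measures: List[int]) -> List[Dict[str, int]]:
--     """Collapse sorted measures to inclusive spans."""
--     if not measures:
--         return []
--     spans: List[Dict[str, int]] = []
--     start = measures[0]
--     end = measures[0]
--     for measure in measures[1:]:
--         if measure == end + 1:
--             end = measure
--             continue
--         spans.append({"start": start, "end": end})
--         start = end = measure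
--     spans.append({"start": start, "end": end})
--     return spans
-- ===== SOURCE B (Python) =====
-- from itertools import groupby
-- from typing import Dict, List
--
-- def _collapse_measures_to_spans(measures: List[int]) -> List[Dict[str, int]]:
--     """Collapse sorted measures to inclusive spans."""
--     spans: List[Dict[str, int]] = []
--     for _, grp in groupby(enumerate(measures), key=lambda pair: pair[1] - pair[0]):
--         run = list(grp)
--         spans.append({"start": run[0][1], "end": run[-1][1]})
--     return spans
-- ===== Notes on version B (the rewrite author's own statement) =====
-- stated objective: idiomatic
-- what changed: Replaces the manual running-end adjacency check with mutable start/end state and explicit span flushes by an itertools.groupby pass keyed on value-minus-index, which groups maximal consecutive runs directly.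
import Mathlib
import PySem

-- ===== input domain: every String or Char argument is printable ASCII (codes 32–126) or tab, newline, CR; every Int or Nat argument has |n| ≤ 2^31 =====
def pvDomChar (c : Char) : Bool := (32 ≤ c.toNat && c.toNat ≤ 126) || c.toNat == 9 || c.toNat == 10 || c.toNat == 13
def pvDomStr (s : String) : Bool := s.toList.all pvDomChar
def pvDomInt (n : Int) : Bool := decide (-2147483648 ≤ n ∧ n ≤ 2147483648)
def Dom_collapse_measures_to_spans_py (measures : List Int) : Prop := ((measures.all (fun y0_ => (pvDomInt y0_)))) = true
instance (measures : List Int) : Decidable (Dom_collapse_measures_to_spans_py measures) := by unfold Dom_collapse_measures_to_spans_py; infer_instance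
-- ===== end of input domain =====

-- B replaces A's manual running-end adjacency loop with a groupby on (value - index), grouping maximal consecutive runs; objective: idiomatic, same O(n) cost.

-- ===== PORT A =====
-- A's loop state: (spans so far, start, end); one step of the for-loop body
def pvAStep (acc : List (List (String × Int)) × Int × Int) (measure : Int) :
    List (List (String × Int)) × Int × Int :=
  if measure = acc.2.2 + 1 then (acc.1, acc.2.1, measure)
  else (acc.1 ++ [[("start", acc.2.1), ("end", acc.2.2)]], measure, measure)

def collapse_measures_to_spans_py (measures : List Int) : List (List (String × Int)) :=
  match measures with
  | [] => []
  | m0 :: rest =>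
    let st := rest.foldl pvAStep ([], m0, m0)
    st.1 ++ [[("start", st.2.1), ("end", st.2.2)]]

-- ===== PORT B =====
-- itertools.groupby(enumerate(measures), key=pair[1]-pair[0]) ported as List.splitBy on key equality
def pvBKeyEq (a b : Int × Int) : Bool := a.2 - a.1 == b.2 - b.1

-- {"start": run[0][1], "end": run[-1][1]} for one materialized group
def pvBSpan (run : List (Int × Int)) : List (String × Int) :=
  [("start", (run.headD (0, 0)).2), ("end", (run.getLastD (0, 0)).2)]

def collapse_measures_to_spans_py_alt (measures : List Int) : List (List (String × Int)) :=
  (List.splitBy pvBKeyEq (PySem.List.enumerate measures 0)).map pvBSpan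

-- ===== PRECONDITION & SPEC =====
def Spec_collapse_measures_to_spans_py (measures : List Int) (out : List (List (String × Int))) : Prop := out = collapse_measures_to_spans_py_alt measures
instance (measures : List Int) (out : List (List (String × Int))) : Decidable (Spec_collapse_measures_to_spans_py measures out) := by unfold Spec_collapse_measures_to_spans_py; infer_instance

-- ===== CLAIM (what is proved, stated in full; the proofs are below) =====
def Claim_equal_collapse_measures_to_spans_py : Prop := ∀ (measures : List Int), Dom_collapse_measures_to_spans_py measures → Spec_collapse_measures_to_spans_py measures (collapse_measures_to_spans_py measures)

-- ===== LEMMAS AND PROOFS =====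

-- common characterization: collapse the tail, given current span (start, e)
def pvSpec (start e : Int) : List Int → List (List (String × Int))
  | [] => [[("start", start), ("end", e)]]
  | m :: ms =>
    if m = e + 1 then pvSpec start m ms
    else [("start", start), ("end", e)] :: pvSpec m m ms

theorem pvA_fold (ms : List Int) : ∀ (spans : List (List (String × Int))) (start e : Int),
    (ms.foldl pvAStep (spans, start, e)).1 ++
      [[("start", (ms.foldl pvAStep (spans, start, e)).2.1),
        ("end", (ms.foldl pvAStep (spans, start, e)).2.2)]] = spans ++ pvSpec start e ms := by
  induction ms with
  | nil => intro spans start e; simp [pvSpec]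
  | cons m ms ih =>
    intro spans start e
    by_cases h : m = e + 1 <;>
      simp [pvSpec, pvAStep, h, ih, List.append_assoc]

theorem pv_lastD (x d : Int × Int) (g : List (Int × Int)) :
    ((x :: g).getLast?.getD d).2 = (g.getLast?.getD x).2 := by
  rw [← List.getLastD_eq_getLast?, ← List.getLastD_eq_getLast?, List.getLastD_cons]

theorem pvB_loop (ms : List Int) : ∀ (i e : Int) (g : List (Int × Int)) (gs : List (List (Int × Int))),
    (List.splitBy.loop pvBKeyEq (PySem.List.enumerate ms (i + 1)) (i, e) g gs).map pvBSpan =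
      gs.reverse.map pvBSpan ++ pvSpec (((i, e) :: g).getLastD (0, 0)).2 e ms := by
  induction ms with
  | nil =>
    intro i e g gs
    cases g <;>
      simp [PySem.List.enumerate, List.splitBy.loop, pvSpec, pvBSpan,
        pv_lastD, List.getLastD_eq_getLast?, List.head?_reverse, List.getLast?_reverse]
  | cons m ms ih =>
    intro i e g gs
    rw [PySem.List.enumerate_cons]
    by_cases h : m = e + 1
    · have hk : pvBKeyEq (i, e) (i + 1, m) = true := by simp [pvBKeyEq, h]
      rw [List.splitBy.loop]
      simp only [hk]
      rw [ih (i + 1) m ((i, e) :: g) gs]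
      simp [pvSpec, h]
    · have hk : pvBKeyEq (i, e) (i + 1, m) = false := by
        simp [pvBKeyEq]; omega
      rw [List.splitBy.loop]
      simp only [hk]
      rw [ih (i + 1) m [] (((i, e) :: g).reverse :: gs)]
      simp [pvSpec, h, pvBSpan, pv_lastD, List.getLastD_eq_getLast?,
        List.head?_reverse, List.getLast?_reverse]

theorem pv_main (measures : List Int) :
    collapse_measures_to_spans_py measures = collapse_measures_to_spans_py_alt measures := by
  cases measures with
  | nil => rfl
  | cons m0 rest =>
    simp only [collapse_measures_to_spans_py, collapse_measures_to_spans_py_alt]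
    rw [PySem.List.enumerate_cons, List.splitBy]
    rw [pvB_loop rest 0 m0 [] []]
    simpa using pvA_fold rest [] m0 m0

-- ===== VERDICT (by name: the statement is the Claim_ definition above) =====
theorem collapse_measures_to_spans_py_spec : Claim_equal_collapse_measures_to_spans_py := by
  intro measures _
  exact pv_main measures
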